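-- pv_equiv track=rewrite | github.com/jaebee94/Algorithm | test2.py | solution
-- ===== SOURCE A (Python) =====
-- def solution(board, K, Ax, Ay):
--     N = len(board)
--     di = [0, 1, 0, -1]
--     dj = [1, 0, -1, 0]
--     bomb = [[False] * N for _ in range(N)]
--     for i in range(N):
--         for j in range(N):
--             if board[i][j] == 1:
--                 bomb[i][j] = True
--                 for k in range(4):
--                     for l in range(1, K + 1):
--                         ni = i + di[k] * l
--                         nj = j + dj[k] * l
--                         if 0 <= ni < N and 0 <= nj < N:
--                             if board[ni][nj] == 2:
--                                 break
--                             elif not bomb[ni][nj]: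
--                                 bomb[ni][nj] = True
--                         else:
--                             break
--
--     s = [(Ax, Ay, 0)]
--     visit = [[False] * N for _ in range(N)]
--     while s:
--         i, j, t = s.pop(0)
--         for k in range(4):
--             ni = i + di[k]
--             nj = j + dj[k]
--             if 0 <= ni < N and 0 <= nj < N:
--                 if not bomb[ni][nj] and board[ni][nj] != 2:
--                     return t + 1
--                 if bomb[ni][nj] and board[ni][nj] == 0 and not visit[ni][nj]:
--                     visit[ni][nj] = True
--                     s.append((ni, nj, t+1))
--     return -1
-- ===== SOURCE B (Python) =====
-- def solution(board, K, Ax, Ay):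
--     N = len(board)
--     danger = set()
--
--     def sweep(cells):
--         since = None  # steps since the last bomb on this line, None when blocked/no bomb yet
--         for i, j in cells:
--             c = board[i][j]
--             if c == 2:
--                 since = None
--             else:
--                 if since is not None:
--                     since += 1
--                     if since <= K:
--                         danger.add((i, j))
--                 if c == 1:
--                     danger.add((i, j))
--                     since = 0
--
--     for r in range(N):
--         fwd = [(r, c) for c in range(N)]
--         down = [(c, r) for c in range(N)]
--         sweep(fwd)
--         sweep(fwd[::-1])
--         sweep(down)
--         sweep(down[::-1])
--
--     q = [(Ax, Ay, 0)]
--     visited = set()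
--     for i, j, t in q:
--         nbrs = [(a, b) for a, b in ((i, j + 1), (i + 1, j), (i, j - 1), (i - 1, j))
--                 if 0 <= a < N and 0 <= b < N]
--         if any((a, b) not in danger and board[a][b] != 2 for a, b in nbrs):
--             return t + 1
--         fresh = [(a, b) for a, b in nbrs
--                  if (a, b) in danger and board[a][b] == 0 and (a, b) not in visited]
--         visited.update(fresh)
--         q.extend((a, b, t + 1) for a, b in fresh)
--     return -1
-- ===== Notes on version B (the rewrite author's own statement) =====
-- stated objective: alternative
-- what changed: B builds the danger map as a set of coordinates via four directional line sweeps per row/column (tracking the distance to the most recent unblocked bomb) instead of A's nested outward spreading from every bomb cell into a boolean grid, and its BFS body computes an in-grid neighbour list, an any()-escape test and a filtered fresh-push list over set-typed visited state instead of A's per-direction early-return loop with incremental flag updates.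
import Mathlib
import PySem

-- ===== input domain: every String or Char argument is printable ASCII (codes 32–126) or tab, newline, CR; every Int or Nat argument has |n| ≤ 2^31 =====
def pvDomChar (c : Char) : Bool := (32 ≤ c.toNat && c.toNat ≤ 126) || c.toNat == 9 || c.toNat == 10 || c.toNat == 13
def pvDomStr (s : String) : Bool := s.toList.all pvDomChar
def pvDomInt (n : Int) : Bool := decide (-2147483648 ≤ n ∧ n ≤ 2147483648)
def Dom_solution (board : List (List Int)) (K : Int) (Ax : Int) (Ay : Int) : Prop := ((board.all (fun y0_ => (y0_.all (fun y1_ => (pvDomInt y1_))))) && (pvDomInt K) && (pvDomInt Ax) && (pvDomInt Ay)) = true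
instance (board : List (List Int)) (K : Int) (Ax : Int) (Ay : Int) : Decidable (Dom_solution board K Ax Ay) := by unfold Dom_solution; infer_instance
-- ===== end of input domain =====

-- B builds the danger map by four directional line sweeps into a set of coordinates (instead of
-- A's outward spreading from every bomb cell into a boolean grid) and runs the BFS with a
-- neighbour-list filter (in-grid candidates, an any-escape test, a filtered fresh-push list and
-- set-typed visited state) instead of A's per-direction early-return recursion.

-- ===== PORT A =====
-- board[i][j]; A only ever reads indices inside the N×N grid (rows have length ≥ N by Pre_),
-- so the defaults are never consulted on admitted inputs.
def bAt (board : List (List Int)) (i j : Int) : Int :=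
  (board.getD i.toNat []).getD j.toNat 0

-- 2D boolean array of Python A (`bomb`, `visit`), represented as a function; `gset` is `arr[i][j] = True`.
def gset (g : Int → Int → Bool) (i j : Int) : Int → Int → Bool :=
  fun x y => if x = i ∧ y = j then true else g x y

def diA : List Int := [0, 1, 0, -1]
def djA : List Int := [1, 0, -1, 0]

-- `for l in range(1, K+1): ...` with its two `break`s, spreading from source (i, j) in direction (u, v)
def sprRayA (board : List (List Int)) (N K i j u v : Int)
    (g : Int → Int → Bool) (l : Int) : Int → Int → Bool :=
  if _h : l ≤ K then
    if 0 ≤ i + u * l ∧ i + u * l < N ∧ 0 ≤ j + v * l ∧ j + v * l < N then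
      if bAt board (i + u * l) (j + v * l) = 2 then g
      else sprRayA board N K i j u v
        (if g (i + u * l) (j + v * l) then g else gset g (i + u * l) (j + v * l)) (l + 1)
    else g
  else g
termination_by (K + 1 - l).toNat
decreasing_by omega

-- `for k in range(4): ...`
def sprDirsA (board : List (List Int)) (N K i j : Int)
    (g : Int → Int → Bool) : Int → Int → Bool :=
  (PySem.List.pyRange 0 4 1).foldl
    (fun g k => sprRayA board N K i j (PySem.List.pyGetD diA k 0) (PySem.List.pyGetD djA k 0) g 1) g

-- body of the double loop filling `bomb`
def srcStep (board : List (List Int)) (N K : Int)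
    (g : Int → Int → Bool) (i j : Int) : Int → Int → Bool :=
  if bAt board i j = 1 then sprDirsA board N K i j (gset g i j) else g

def bombGridA (board : List (List Int)) (K : Int) : Int → Int → Bool :=
  (PySem.List.pyRange 0 (board.length : Int) 1).foldl
    (fun g i => (PySem.List.pyRange 0 (board.length : Int) 1).foldl
      (fun g j => srcStep board (board.length : Int) K g i j) g)
    (fun _ _ => false)

-- `for k in range(4)` of the BFS body: either an early `return t+1`, or updated visit plus appended cells
def scanA (board : List (List Int)) (N : Int) (bomb : Int → Int → Bool) (i j t : Int) :
    (Int → Int → Bool) → List Int → Option Int × (Int → Int → Bool) × List (Int × Int × Int)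
  | visit, [] => (none, visit, [])
  | visit, k :: ks =>
    let ni := i + PySem.List.pyGetD diA k 0
    let nj := j + PySem.List.pyGetD djA k 0
    if 0 ≤ ni ∧ ni < N ∧ 0 ≤ nj ∧ nj < N then
      if ¬ bomb ni nj = true ∧ bAt board ni nj ≠ 2 then (some (t + 1), visit, [])
      else if bomb ni nj = true ∧ bAt board ni nj = 0 ∧ ¬ visit ni nj = true then
        let r := scanA board N bomb i j t (gset visit ni nj) ks
        (r.1, r.2.1, (ni, nj, t + 1) :: r.2.2)
      else scanA board N bomb i j t visit ks
    else scanA board N bomb i j t visit ks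

-- `while s:` loop; the fuel N*N+1 bounds the number of pops (each push freshly marks a grid cell
-- in `visit`, so there are at most N*N pushes and N*N+1 pops before the queue empties).
def bfsA (board : List (List Int)) (N : Int) (bomb : Int → Int → Bool) :
    Nat → List (Int × Int × Int) → (Int → Int → Bool) → Int
  | 0, _, _ => -1
  | _ + 1, [], _ => -1
  | f + 1, (i, j, t) :: rest, visit =>
    match scanA board N bomb i j t visit (PySem.List.pyRange 0 4 1) with
    | (some r, _, _) => r
    | (none, visit', pushes) => bfsA board N bomb f (rest ++ pushes) visit'

def solution (board : List (List Int)) (K : Int) (Ax : Int) (Ay : Int) : Int :=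
  bfsA board (board.length : Int) (bombGridA board K)
    (board.length * board.length + 1) [(Ax, Ay, 0)] (fun _ _ => false)

-- ===== PORT B =====
-- board[p[0]][p[1]] for a coordinate pair p (defaults never consulted under Pre_)
def cellB (board : List (List Int)) (p : Int × Int) : Int :=
  (board.getD p.1.toNat []).getD p.2.toNat 0

-- one `sweep(cells)` pass of Source B: `since` = steps since the last bomb on the line
-- (None when blocked by a wall or before any bomb), `danger` is the Python set being grown
def sweepS (board : List (List Int)) (K : Int) :
    PySem.Set (Int × Int) → Option Int → List (Int × Int) → PySem.Set (Int × Int)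
  | danger, _, [] => danger
  | danger, since, c :: rest =>
    if cellB board c = 2 then sweepS board K danger none rest
    else
      let st : PySem.Set (Int × Int) × Option Int :=
        match since with
        | none => (danger, none)
        | some n => (if n + 1 ≤ K then PySem.Set.add danger c else danger, some (n + 1))
      if cellB board c = 1 then sweepS board K (PySem.Set.add st.1 c) (some 0) rest
      else sweepS board K st.1 st.2 rest

-- `fwd = [(r, c) for c in range(N)]` and `down = [(c, r) for c in range(N)]`
def fwdL (N r : Int) : List (Int × Int) := (PySem.List.pyRange 0 N 1).map (fun c => (r, c))
def downL (N r : Int) : List (Int × Int) := (PySem.List.pyRange 0 N 1).map (fun c => (c, r))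

-- the `for r in range(N)` loop of the four sweeps; `xs[::-1]` is ported as List.reverse (exact)
def dangerSet (board : List (List Int)) (K : Int) : PySem.Set (Int × Int) :=
  (PySem.List.pyRange 0 (board.length : Int) 1).foldl
    (fun s r =>
      sweepS board K
        (sweepS board K
          (sweepS board K
            (sweepS board K s none (fwdL (board.length : Int) r))
            none (fwdL (board.length : Int) r).reverse)
          none (downL (board.length : Int) r))
        none (downL (board.length : Int) r).reverse)
    PySem.Set.empty

-- `[(a, b) for a, b in ((i, j+1), (i+1, j), (i, j-1), (i-1, j)) if 0 <= a < N and 0 <= b < N]`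
def nbrsB (N i j : Int) : List (Int × Int) :=
  ([(i, j + 1), (i + 1, j), (i, j - 1), (i - 1, j)]).filter
    (fun p => decide (0 ≤ p.1) && decide (p.1 < N) && decide (0 ≤ p.2) && decide (p.2 < N))

-- the `for i, j, t in q` loop of Source B (iterating a list while appending = FIFO queue);
-- same fuel bound N*N+1 on the number of processed entries as in port A
def bfsLoopB (board : List (List Int)) (N : Int) (danger : PySem.Set (Int × Int)) :
    Nat → List (Int × Int × Int) → PySem.Set (Int × Int) → Int
  | 0, _, _ => -1
  | _ + 1, [], _ => -1
  | f + 1, (i, j, t) :: rest, visited =>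
    let ns := nbrsB N i j
    if ns.any (fun p => !(PySem.Set.contains danger p) && !(cellB board p == 2)) then t + 1
    else
      let fresh := ns.filter (fun p =>
        PySem.Set.contains danger p && (cellB board p == 0) && !(PySem.Set.contains visited p))
      bfsLoopB board N danger f (rest ++ fresh.map (fun p => (p.1, p.2, t + 1)))
        (PySem.Set.update visited fresh)

def solution_alt (board : List (List Int)) (K : Int) (Ax : Int) (Ay : Int) : Int :=
  bfsLoopB board (board.length : Int) (dangerSet board K)
    (board.length * board.length + 1) [(Ax, Ay, 0)] PySem.Set.empty

-- ===== PRECONDITION & SPEC =====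
-- Pre_ excludes exactly the inputs on which Python A raises IndexError: a row shorter than
-- the number of rows (A reads board[i][j] for every i, j < len(board) while spreading bombs).
def Pre_solution (board : List (List Int)) (K : Int) (Ax : Int) (Ay : Int) : Prop :=
  ∀ row ∈ board, board.length ≤ row.length
instance (board : List (List Int)) (K : Int) (Ax : Int) (Ay : Int) : Decidable (Pre_solution board K Ax Ay) := by unfold Pre_solution; infer_instance

def pvWitness_solution : List (List Int) × Int × Int × Int := ([[1, 0], [0, 0]], 1, 0, 0)

def Spec_solution (board : List (List Int)) (K : Int) (Ax : Int) (Ay : Int) (out : Int) : Prop := out = solution_alt board K Ax Ay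
instance (board : List (List Int)) (K : Int) (Ax : Int) (Ay : Int) (out : Int) : Decidable (Spec_solution board K Ax Ay out) := by unfold Spec_solution; infer_instance

-- ===== CLAIM (what is proved, stated in full; the proofs are below) =====
def Claim_equal_solution : Prop := ∀ (board : List (List Int)) (K : Int) (Ax : Int) (Ay : Int), Dom_solution board K Ax Ay → Pre_solution board K Ax Ay → Spec_solution board K Ax Ay (solution board K Ax Ay)

-- ===== LEMMAS AND PROOFS =====

theorem cellB_pair (board : List (List Int)) (i j : Int) :
    cellB board (i, j) = bAt board i j := rfl

def InG (N x y : Int) : Prop := 0 ≤ x ∧ x < N ∧ 0 ≤ y ∧ y < N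

-- A's spread from source (i,j) in direction (u,v) reaches (x,y)
def RayP (board : List (List Int)) (N K i j u v x y : Int) : Prop :=
  ∃ l, 1 ≤ l ∧ l ≤ K ∧ x = i + u * l ∧ y = j + v * l ∧
    ∀ m, 1 ≤ m → m ≤ l →
      (InG N (i + u * m) (j + v * m) ∧ bAt board (i + u * m) (j + v * m) ≠ 2)

def MarkP (board : List (List Int)) (N K i j x y : Int) : Prop :=
  (x = i ∧ y = j) ∨ RayP board N K i j 0 1 x y ∨ RayP board N K i j 1 0 x y ∨
    RayP board N K i j 0 (-1) x y ∨ RayP board N K i j (-1) 0 x y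

-- B's scan from (x,y) in direction (u,v) finds a bomb
def ScanP (board : List (List Int)) (N K x y u v : Int) : Prop :=
  ∃ l, 1 ≤ l ∧ l ≤ K ∧ InG N (x + u * l) (y + v * l) ∧
    bAt board (x + u * l) (y + v * l) = 1 ∧
    ∀ m, 1 ≤ m → m < l →
      (InG N (x + u * m) (y + v * m) ∧ bAt board (x + u * m) (y + v * m) ≠ 2)

theorem gset_iff (g : Int → Int → Bool) (i j x y : Int) :
    (gset g i j x y = true) ↔ (g x y = true ∨ (x = i ∧ y = j)) := by
  simp only [gset]; split_ifs with h <;> simp [h]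

theorem ray_spec (board : List (List Int)) (N K i j u v x y : Int) :
    ∀ (n : Nat) (a : Int) (g : Int → Int → Bool), 1 ≤ a → (K + 1 - a).toNat ≤ n →
      ((sprRayA board N K i j u v g a) x y = true ↔
        (g x y = true ∨ ∃ l, a ≤ l ∧ l ≤ K ∧ x = i + u * l ∧ y = j + v * l ∧
          ∀ m, a ≤ m → m ≤ l →
            (InG N (i + u * m) (j + v * m) ∧ bAt board (i + u * m) (j + v * m) ≠ 2))) := by
  intro n
  induction n with
  | zero =>
    intro a g ha hn
    rw [sprRayA]
    rw [dif_neg (by omega : ¬ a ≤ K)]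
    constructor
    · exact Or.inl
    · rintro (h | ⟨l, h1, h2, _⟩)
      · exact h
      · omega
  | succ n ih =>
    intro a g ha hn
    by_cases hK : a ≤ K
    · rw [sprRayA, dif_pos hK]
      by_cases hin : 0 ≤ i + u * a ∧ i + u * a < N ∧ 0 ≤ j + v * a ∧ j + v * a < N
      · rw [if_pos hin]
        by_cases h2 : bAt board (i + u * a) (j + v * a) = 2
        · rw [if_pos h2]
          constructor
          · exact Or.inl
          · rintro (h | ⟨l, hl1, hl2, hx, hy, hall⟩)
            · exact h
            · exact absurd (hall a le_rfl (by omega)).2 (by simp [h2])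
        · rw [if_neg h2]
          have hg' : ((if g (i + u * a) (j + v * a) = true then g
              else gset g (i + u * a) (j + v * a)) x y = true) ↔
              (g x y = true ∨ (x = i + u * a ∧ y = j + v * a)) := by
            split_ifs with hb
            · constructor
              · exact Or.inl
              · rintro (h | ⟨hx, hy⟩)
                · exact h
                · rw [hx, hy]; exact hb
            · exact gset_iff ..
          rw [ih (a + 1) _ (by omega) (by omega), hg']
          constructor
          · rintro ((h | ⟨hx, hy⟩) | ⟨l, hl1, hl2, hx, hy, hall⟩)
            · exact Or.inl h
            · refine Or.inr ⟨a, le_rfl, hK, hx, hy, fun m hm1 hm2 => ?_⟩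
              have : m = a := by omega
              rw [this]; exact ⟨hin, h2⟩
            · refine Or.inr ⟨l, by omega, hl2, hx, hy, fun m hm1 hm2 => ?_⟩
              by_cases hma : m = a
              · rw [hma]; exact ⟨hin, h2⟩
              · exact hall m (by omega) hm2
          · rintro (h | ⟨l, hl1, hl2, hx, hy, hall⟩)
            · exact Or.inl (Or.inl h)
            · by_cases hla : l = a
              · subst hla; exact Or.inl (Or.inr ⟨hx, hy⟩)
              · exact Or.inr ⟨l, by omega, hl2, hx, hy, fun m hm1 hm2 => hall m (by omega) hm2⟩
      · rw [if_neg hin]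
        constructor
        · exact Or.inl
        · rintro (h | ⟨l, hl1, hl2, hx, hy, hall⟩)
          · exact h
          · exact absurd (hall a le_rfl (by omega)).1 hin
    · rw [sprRayA, dif_neg hK]
      constructor
      · exact Or.inl
      · rintro (h | ⟨l, h1, h2, _⟩)
        · exact h
        · omega

theorem ray_spec1 (board : List (List Int)) (N K i j u v x y : Int) (g : Int → Int → Bool) :
    ((sprRayA board N K i j u v g 1) x y = true ↔
      (g x y = true ∨ RayP board N K i j u v x y)) := by
  have h := ray_spec board N K i j u v x y K.toNat 1 g le_rfl (by omega)
  rw [h]; rfl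

theorem srcStep_iff (board : List (List Int)) (N K : Int) (g : Int → Int → Bool) (i j x y : Int) :
    ((srcStep board N K g i j) x y = true) ↔
      (g x y = true ∨ (bAt board i j = 1 ∧ MarkP board N K i j x y)) := by
  unfold srcStep
  by_cases hb : bAt board i j = 1
  · rw [if_pos hb]
    unfold sprDirsA
    rw [show PySem.List.pyRange 0 4 1 = [0, 1, 2, 3] from by decide]
    simp only [List.foldl_cons, List.foldl_nil]
    rw [show PySem.List.pyGetD diA 0 0 = (0 : Int) from by decide,
        show PySem.List.pyGetD djA 0 0 = (1 : Int) from by decide,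
        show PySem.List.pyGetD diA 1 0 = (1 : Int) from by decide,
        show PySem.List.pyGetD djA 1 0 = (0 : Int) from by decide,
        show PySem.List.pyGetD diA 2 0 = (0 : Int) from by decide,
        show PySem.List.pyGetD djA 2 0 = (-1 : Int) from by decide,
        show PySem.List.pyGetD diA 3 0 = (-1 : Int) from by decide,
        show PySem.List.pyGetD djA 3 0 = (0 : Int) from by decide]
    rw [ray_spec1, ray_spec1, ray_spec1, ray_spec1, gset_iff]
    unfold MarkP
    tauto
  · rw [if_neg hb]
    tauto

theorem foldJ (board : List (List Int)) (N K i x y : Int) :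
    ∀ (js : List Int) (g : Int → Int → Bool),
      ((js.foldl (fun g j => srcStep board N K g i j) g) x y = true) ↔
        (g x y = true ∨ ∃ j ∈ js, bAt board i j = 1 ∧ MarkP board N K i j x y) := by
  intro js
  induction js with
  | nil => intro g; simp
  | cons j js ih =>
    intro g
    simp only [List.foldl_cons]
    rw [ih, srcStep_iff]
    simp only [List.mem_cons]
    constructor
    · rintro ((h | h) | ⟨j', hj', h⟩)
      · exact Or.inl h
      · exact Or.inr ⟨j, Or.inl rfl, h⟩
      · exact Or.inr ⟨j', Or.inr hj', h⟩
    · rintro (h | ⟨j', (rfl | hj'), h⟩)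
      · exact Or.inl (Or.inl h)
      · exact Or.inl (Or.inr h)
      · exact Or.inr ⟨j', hj', h⟩

theorem foldI (board : List (List Int)) (N K x y : Int) :
    ∀ (is : List Int) (g : Int → Int → Bool),
      ((is.foldl (fun g i => (PySem.List.pyRange 0 N 1).foldl
          (fun g j => srcStep board N K g i j) g) g) x y = true) ↔
        (g x y = true ∨ ∃ i ∈ is, ∃ j ∈ PySem.List.pyRange 0 N 1,
          bAt board i j = 1 ∧ MarkP board N K i j x y) := by
  intro is
  induction is with
  | nil => intro g; simp
  | cons i is ih =>
    intro g
    simp only [List.foldl_cons]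
    rw [ih, foldJ]
    simp only [List.mem_cons]
    constructor
    · rintro ((h | h) | ⟨i', hi', h⟩)
      · exact Or.inl h
      · exact Or.inr ⟨i, Or.inl rfl, h⟩
      · exact Or.inr ⟨i', Or.inr hi', h⟩
    · rintro (h | ⟨i', (rfl | hi'), h⟩)
      · exact Or.inl (Or.inl h)
      · exact Or.inl (Or.inr h)
      · exact Or.inr ⟨i', hi', h⟩

theorem bombA_iff (board : List (List Int)) (K x y : Int) :
    (bombGridA board K x y = true) ↔
      (∃ i, (0 ≤ i ∧ i < (board.length : Int)) ∧ ∃ j, (0 ≤ j ∧ j < (board.length : Int)) ∧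
        bAt board i j = 1 ∧ MarkP board (board.length : Int) K i j x y) := by
  unfold bombGridA
  rw [foldI]
  simp only [PySem.List.mem_pyRange_one]
  constructor
  · rintro (h | ⟨i, hi, j, hj, h⟩)
    · exact absurd h (by simp)
    · exact ⟨i, hi, j, hj, h⟩
  · rintro ⟨i, hi, j, hj, h⟩
    exact Or.inr ⟨i, hi, j, hj, h⟩

-- distance-t invariant of the sweep state: the cell t steps back (at position p-1-t of the
-- line) is a bomb, with no wall from there up to position p-1
def GoodP (board : List (List Int)) (si sj u v p t : Int) : Prop :=
  0 ≤ t ∧ t + 1 ≤ p ∧ bAt board (si + u * (p - 1 - t)) (sj + v * (p - 1 - t)) = 1 ∧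
    ∀ s, p - 1 - t < s → s < p → bAt board (si + u * s) (sj + v * s) ≠ 2

-- what one pass marks at position m of its line
def LineSpecP (board : List (List Int)) (K si sj u v m : Int) : Prop :=
  bAt board (si + u * m) (sj + v * m) = 1 ∨
    (bAt board (si + u * m) (sj + v * m) ≠ 2 ∧ ∃ t, 1 ≤ t ∧ t ≤ K ∧ t ≤ m ∧
      bAt board (si + u * (m - t)) (sj + v * (m - t)) = 1 ∧
      ∀ s, m - t < s → s < m → bAt board (si + u * s) (sj + v * s) ≠ 2)

theorem good_succ (board : List (List Int)) (si sj u v p t : Int)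
    (h1 : 1 ≤ t) (h2 : t ≤ p)
    (hb : bAt board (si + u * (p - t)) (sj + v * (p - t)) = 1)
    (hw : ∀ s, p - t < s → s < p → bAt board (si + u * s) (sj + v * s) ≠ 2)
    (hp : bAt board (si + u * p) (sj + v * p) ≠ 2) :
    GoodP board si sj u v (p + 1) t := by
  refine ⟨by omega, by omega, ?_, ?_⟩
  · have e : p + 1 - 1 - t = p - t := by ring
    rw [e]; exact hb
  · intro s hs1 hs2
    by_cases hsp : s = p
    · rw [hsp]; exact hp
    · exact hw s (by omega) (by omega)

theorem sweep_spec (board : List (List Int)) (K si sj u v x y L : Int) :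
    ∀ (n : Nat) (p : Int) (S : PySem.Set (Int × Int)) (d : Option Int), 0 ≤ p →
      (L - p).toNat ≤ n →
      (∀ t, d = some t → GoodP board si sj u v p t) →
      (∀ t', GoodP board si sj u v p t' → ∃ t, d = some t ∧ t ≤ t') →
      ((x, y) ∈ sweepS board K S d ((PySem.List.pyRange p L 1).map (fun m => (si + u * m, sj + v * m))) ↔
        ((x, y) ∈ S ∨ ∃ m, p ≤ m ∧ m < L ∧ x = si + u * m ∧ y = sj + v * m ∧
          LineSpecP board K si sj u v m)) := by
  intro n
  induction n with
  | zero =>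
    intro p S d hp hn _ _
    rw [PySem.List.pyRange_one_eq_nil (by omega), List.map_nil]
    simp only [sweepS]
    constructor
    · exact Or.inl
    · rintro (h | ⟨m, hm1, hm2, _⟩)
      · exact h
      · omega
  | succ n ih =>
    intro p S d hp hn hsound hcomp
    by_cases hpL : p < L
    · rw [PySem.List.pyRange_one_cons hpL, List.map_cons]
      simp only [sweepS, cellB_pair]
      by_cases hw : bAt board (si + u * p) (sj + v * p) = 2
      · rw [if_pos hw]
        rw [ih (p + 1) S none (by omega) (by omega)
          (by intro t h; exact absurd h (by simp))
          (by
            rintro t' ⟨ht0, ht1, hb, hall⟩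
            exfalso
            by_cases h0 : t' = 0
            · subst h0
              have e : p + 1 - 1 - (0 : Int) = p := by ring
              rw [e] at hb
              rw [hb] at hw; omega
            · exact hall p (by omega) (by omega) hw)]
        constructor
        · rintro (h | ⟨m, hm1, hm2, hx, hy, hspec⟩)
          · exact Or.inl h
          · exact Or.inr ⟨m, by omega, hm2, hx, hy, hspec⟩
        · rintro (h | ⟨m, hm1, hm2, hx, hy, hspec⟩)
          · exact Or.inl h
          · refine Or.inr ⟨m, ?_, hm2, hx, hy, hspec⟩
            rcases lt_or_eq_of_le hm1 with h | h
            · omega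
            · exfalso
              subst h
              rcases hspec with h1 | ⟨h2, _⟩
              · rw [h1] at hw; omega
              · exact h2 hw
      · rw [if_neg hw]
        cases d with
        | none =>
          dsimp only
          by_cases hb1 : bAt board (si + u * p) (sj + v * p) = 1
          · rw [if_pos hb1]
            rw [ih (p + 1) _ (some 0) (by omega) (by omega)
              (by
                intro t h
                have ht : t = 0 := by simpa using h.symm
                subst ht
                refine ⟨le_rfl, by omega, ?_, by intro s h1 h2; omega⟩
                have e : p + 1 - 1 - (0 : Int) = p := by ring
                rw [e]; exact hb1)
              (by intro t' ht'; exact ⟨0, rfl, ht'.1⟩)]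
            rw [PySem.Set.mem_add]
            constructor
            · rintro ((h | hc) | ⟨m, hm1, hm2, hx, hy, hspec⟩)
              · exact Or.inl h
              · have hx : x = si + u * p ∧ y = sj + v * p := by
                  have := Prod.ext_iff.mp hc; exact ⟨this.1, this.2⟩
                exact Or.inr ⟨p, le_rfl, hpL, hx.1, hx.2, Or.inl hb1⟩
              · exact Or.inr ⟨m, by omega, hm2, hx, hy, hspec⟩
            · rintro (h | ⟨m, hm1, hm2, hx, hy, hspec⟩)
              · exact Or.inl (Or.inl h)
              · rcases lt_or_eq_of_le hm1 with hlt | heq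
                · exact Or.inr ⟨m, by omega, hm2, hx, hy, hspec⟩
                · subst heq
                  exact Or.inl (Or.inr (by rw [hx, hy]))
          · rw [if_neg hb1]
            rw [ih (p + 1) S none (by omega) (by omega)
              (by intro t h; exact absurd h (by simp))
              (by
                rintro t' ⟨ht0, ht1, hb, hall⟩
                exfalso
                by_cases h0 : t' = 0
                · subst h0
                  have e : p + 1 - 1 - (0 : Int) = p := by ring
                  rw [e] at hb
                  exact hb1 hb
                · have hgood : GoodP board si sj u v p (t' - 1) := by
                    refine ⟨by omega, by omega, ?_, ?_⟩
                    · have e : p - 1 - (t' - 1) = p + 1 - 1 - t' := by ring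
                      rw [e]; exact hb
                    · intro s h1 h2; exact hall s (by omega) (by omega)
                  obtain ⟨t, ht, _⟩ := hcomp _ hgood
                  exact absurd ht (by simp))]
            constructor
            · rintro (h | ⟨m, hm1, hm2, hx, hy, hspec⟩)
              · exact Or.inl h
              · exact Or.inr ⟨m, by omega, hm2, hx, hy, hspec⟩
            · rintro (h | ⟨m, hm1, hm2, hx, hy, hspec⟩)
              · exact Or.inl h
              · rcases lt_or_eq_of_le hm1 with hlt | heq
                · exact Or.inr ⟨m, by omega, hm2, hx, hy, hspec⟩
                · exfalso
                  subst heq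
                  rcases hspec with h1 | ⟨_, t, ht1, htK, htm, hb, hall⟩
                  · exact hb1 h1
                  · have hgood : GoodP board si sj u v p (t - 1) := by
                      refine ⟨by omega, by omega, ?_, ?_⟩
                      · have e : p - 1 - (t - 1) = p - t := by ring
                        rw [e]; exact hb
                      · intro s h1 h2; exact hall s (by omega) (by omega)
                    obtain ⟨t0, ht0, _⟩ := hcomp _ hgood
                    exact absurd ht0 (by simp)
        | some t =>
          dsimp only
          have hgt := hsound t rfl
          obtain ⟨hgt0, hgtp, hgb, hgw⟩ := hgt
          have hmark : ∀ (S' : PySem.Set (Int × Int)),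
              ((x, y) ∈ (if t + 1 ≤ K then PySem.Set.add S' (si + u * p, sj + v * p) else S') ↔
                ((x, y) ∈ S' ∨ (x = si + u * p ∧ y = sj + v * p ∧ t + 1 ≤ K))) := by
            intro S'
            split_ifs with hK
            · rw [PySem.Set.mem_add]
              constructor
              · rintro (h | hc)
                · exact Or.inl h
                · have := Prod.ext_iff.mp hc
                  exact Or.inr ⟨this.1, this.2, hK⟩
              · rintro (h | ⟨hx, hy, _⟩)
                · exact Or.inl h
                · exact Or.inr (by rw [hx, hy])
            · constructor
              · exact Or.inl
              · rintro (h | ⟨_, _, h⟩)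
                · exact h
                · omega
          by_cases hb1 : bAt board (si + u * p) (sj + v * p) = 1
          all_goals (
            first
            | rw [if_pos hb1]
            | rw [if_neg hb1])
          · -- bomb cell: marks from distance then resets to 0
            rw [ih (p + 1) _ (some 0) (by omega) (by omega)
              (by
                intro t' h
                have ht : t' = 0 := by simpa using h.symm
                subst ht
                refine ⟨le_rfl, by omega, ?_, by intro s h1 h2; omega⟩
                have e : p + 1 - 1 - (0 : Int) = p := by ring
                rw [e]; exact hb1)
              (by intro t' ht'; exact ⟨0, rfl, ht'.1⟩)]
            rw [PySem.Set.mem_add, hmark]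
            constructor
            · rintro (((h | ⟨hx, hy, _⟩) | hc) | ⟨m, hm1, hm2, hx, hy, hspec⟩)
              · exact Or.inl h
              · exact Or.inr ⟨p, le_rfl, hpL, hx, hy, Or.inl hb1⟩
              · have := Prod.ext_iff.mp hc
                exact Or.inr ⟨p, le_rfl, hpL, this.1, this.2, Or.inl hb1⟩
              · exact Or.inr ⟨m, by omega, hm2, hx, hy, hspec⟩
            · rintro (h | ⟨m, hm1, hm2, hx, hy, hspec⟩)
              · exact Or.inl (Or.inl (Or.inl h))
              · rcases lt_or_eq_of_le hm1 with hlt | heq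
                · exact Or.inr ⟨m, by omega, hm2, hx, hy, hspec⟩
                · subst heq
                  exact Or.inl (Or.inr (by rw [hx, hy]))
          · -- plain cell: marks from distance, distance grows
            rw [ih (p + 1) _ (some (t + 1)) (by omega) (by omega)
              (by
                intro t' h
                have ht : t' = t + 1 := by simpa using h.symm
                subst ht
                exact good_succ board si sj u v p (t + 1) (by omega) (by omega)
                  (by
                    have e : p - (t + 1) = p - 1 - t := by ring
                    rw [e]; exact hgb)
                  (by intro s h1 h2; exact hgw s (by omega) h2) hw)
              (by
                rintro t' ht'
                obtain ⟨ht'0, ht'1, hb, hall⟩ := ht'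
                have h0 : t' ≠ 0 := by
                  intro h0
                  subst h0
                  have e : p + 1 - 1 - (0 : Int) = p := by ring
                  rw [e] at hb
                  exact hb1 hb
                have hgood : GoodP board si sj u v p (t' - 1) := by
                  refine ⟨by omega, by omega, ?_, ?_⟩
                  · have e : p - 1 - (t' - 1) = p + 1 - 1 - t' := by ring
                    rw [e]; exact hb
                  · intro s h1 h2; exact hall s (by omega) (by omega)
                obtain ⟨t0, ht0, hle⟩ := hcomp _ hgood
                have ht0t : t0 = t := by simpa using ht0.symm
                exact ⟨t + 1, rfl, by omega⟩)]
            rw [hmark]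
            have hps : LineSpecP board K si sj u v p ↔ t + 1 ≤ K := by
              constructor
              · rintro (h1 | ⟨_, t'', h1, h2, h3, hb, hall⟩)
                · exact absurd h1 hb1
                · have hgood : GoodP board si sj u v p (t'' - 1) := by
                    refine ⟨by omega, by omega, ?_, ?_⟩
                    · have e : p - 1 - (t'' - 1) = p - t'' := by ring
                      rw [e]; exact hb
                    · intro s hs1 hs2; exact hall s (by omega) hs2
                  obtain ⟨t0, ht0, hle⟩ := hcomp _ hgood
                  have : t0 = t := by simpa using ht0.symm
                  omega
              · intro hK
                refine Or.inr ⟨hw, t + 1, by omega, hK, by omega, ?_, ?_⟩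
                · have e : p - (t + 1) = p - 1 - t := by ring
                  rw [e]; exact hgb
                · intro s h1 h2; exact hgw s (by omega) h2
            constructor
            · rintro ((h | ⟨hx, hy, hK⟩) | ⟨m, hm1, hm2, hx, hy, hspec⟩)
              · exact Or.inl h
              · exact Or.inr ⟨p, le_rfl, hpL, hx, hy, hps.mpr hK⟩
              · exact Or.inr ⟨m, by omega, hm2, hx, hy, hspec⟩
            · rintro (h | ⟨m, hm1, hm2, hx, hy, hspec⟩)
              · exact Or.inl (Or.inl h)
              · rcases lt_or_eq_of_le hm1 with hlt | heq
                · exact Or.inr ⟨m, by omega, hm2, hx, hy, hspec⟩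
                · subst heq
                  exact Or.inl (Or.inr ⟨hx, hy, hps.mp hspec⟩)
    · rw [PySem.List.pyRange_one_eq_nil (by omega), List.map_nil]
      simp only [sweepS]
      constructor
      · exact Or.inl
      · rintro (h | ⟨m, hm1, hm2, _⟩)
        · exact h
        · omega

theorem sweep_line (board : List (List Int)) (K si sj u v x y L : Int) (S : PySem.Set (Int × Int)) :
    ((x, y) ∈ sweepS board K S none ((PySem.List.pyRange 0 L 1).map (fun m => (si + u * m, sj + v * m))) ↔
      ((x, y) ∈ S ∨ ∃ m, 0 ≤ m ∧ m < L ∧ x = si + u * m ∧ y = sj + v * m ∧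
        LineSpecP board K si sj u v m)) := by
  refine sweep_spec board K si sj u v x y L L.toNat 0 S none le_rfl (by omega)
    (by intro t h; exact absurd h (by simp)) ?_
  rintro t' ⟨h1, h2, _⟩
  omega

-- translate a line-local mark into the direction-(−u,−v) scan predicate, given that the whole
-- segment of the line up to position m lies in the grid and, conversely, that in-grid points
-- backwards along the line have nonnegative positions
theorem lineSpec_iff_scan (board : List (List Int)) (N K si sj u v m : Int)
    (hcell : ∀ s, 0 ≤ s → s ≤ m → InG N (si + u * s) (sj + v * s))
    (hback : ∀ l, 1 ≤ l → InG N (si + u * (m - l)) (sj + v * (m - l)) → l ≤ m)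
    (hm : 0 ≤ m) :
    (LineSpecP board K si sj u v m ↔
      (bAt board (si + u * m) (sj + v * m) = 1 ∨
        (bAt board (si + u * m) (sj + v * m) ≠ 2 ∧
          ScanP board N K (si + u * m) (sj + v * m) (-u) (-v)))) := by
  constructor
  · rintro (h | ⟨hne, t, h1, h2, h3, hb, hall⟩)
    · exact Or.inl h
    · refine Or.inr ⟨hne, t, h1, h2, ?_, ?_, ?_⟩
      · have e1 : si + u * m + -u * t = si + u * (m - t) := by ring
        have e2 : sj + v * m + -v * t = sj + v * (m - t) := by ring
        rw [e1, e2]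
        exact hcell (m - t) (by omega) (by omega)
      · have e1 : si + u * m + -u * t = si + u * (m - t) := by ring
        have e2 : sj + v * m + -v * t = sj + v * (m - t) := by ring
        rw [e1, e2]; exact hb
      · intro mm hmm1 hmm2
        have e1 : si + u * m + -u * mm = si + u * (m - mm) := by ring
        have e2 : sj + v * m + -v * mm = sj + v * (m - mm) := by ring
        rw [e1, e2]
        exact ⟨hcell (m - mm) (by omega) (by omega), hall (m - mm) (by omega) (by omega)⟩
  · rintro (h | ⟨hne, l, h1, h2, hing, hb, hall⟩)
    · exact Or.inl h
    · have e1 : si + u * m + -u * l = si + u * (m - l) := by ring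
      have e2 : sj + v * m + -v * l = sj + v * (m - l) := by ring
      rw [e1, e2] at hing hb
      refine Or.inr ⟨hne, l, h1, h2, hback l h1 hing, hb, ?_⟩
      intro s hs1 hs2
      have h := hall (m - s) (by omega) (by omega)
      have e3 : si + u * m + -u * (m - s) = si + u * s := by ring
      have e4 : sj + v * m + -v * (m - s) = sj + v * s := by ring
      rw [e3, e4] at h
      exact h.2

-- the four concrete line lists of Source B as generic lines
theorem fwdL_eq (N r : Int) :
    fwdL N r = (PySem.List.pyRange 0 N 1).map (fun m => (r + 0 * m, 0 + 1 * m)) := by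
  unfold fwdL
  refine List.map_congr_left ?_
  intro m _
  simp

theorem downL_eq (N r : Int) :
    downL N r = (PySem.List.pyRange 0 N 1).map (fun m => (0 + 1 * m, r + 0 * m)) := by
  unfold downL
  refine List.map_congr_left ?_
  intro m _
  simp

theorem rev_range (N : Int) :
    (PySem.List.pyRange 0 N 1).reverse = PySem.List.pyRange (N - 1) (-1) (-1) := by
  have h := PySem.List.pyRange_neg_one_eq_reverse (N - 1) (-1)
  rw [h]
  norm_num

theorem fwdL_rev_eq (N r : Int) :
    (fwdL N r).reverse = (PySem.List.pyRange 0 N 1).map (fun m => (r + 0 * m, (N - 1) + (-1) * m)) := by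
  unfold fwdL
  rw [← List.map_reverse, rev_range]
  rw [PySem.List.pyRange_neg_one, PySem.List.pyRange_one, List.map_map, List.map_map]
  have e : (N - 1 - -1).toNat = (N - 0).toNat := by omega
  rw [e]
  refine List.map_congr_left ?_
  intro m _
  simp only [Function.comp_apply, Prod.ext_iff]
  constructor <;> ring

theorem downL_rev_eq (N r : Int) :
    (downL N r).reverse = (PySem.List.pyRange 0 N 1).map (fun m => ((N - 1) + (-1) * m, r + 0 * m)) := by
  unfold downL
  rw [← List.map_reverse, rev_range]
  rw [PySem.List.pyRange_neg_one, PySem.List.pyRange_one, List.map_map, List.map_map]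
  have e : (N - 1 - -1).toNat = (N - 0).toNat := by omega
  rw [e]
  refine List.map_congr_left ?_
  intro m _
  simp only [Function.comp_apply, Prod.ext_iff]
  constructor <;> ring

theorem pass_fwd (board : List (List Int)) (N K r x y : Int) (hr : 0 ≤ r ∧ r < N)
    (S : PySem.Set (Int × Int)) :
    ((x, y) ∈ sweepS board K S none (fwdL N r) ↔
      ((x, y) ∈ S ∨ (x = r ∧ 0 ≤ y ∧ y < N ∧
        (bAt board x y = 1 ∨ (bAt board x y ≠ 2 ∧ ScanP board N K x y 0 (-1)))))) := by
  rw [fwdL_eq, sweep_line]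
  constructor
  · rintro (h | ⟨m, hm1, hm2, hx, hy, hspec⟩)
    · exact Or.inl h
    · have h := (lineSpec_iff_scan board N K r 0 0 1 m
        (by intro s h1 h2; exact ⟨by omega, by omega, by omega, by omega⟩)
        (by intro l h1 hing; have := hing.2.2.1; omega)
        (by omega)).mp hspec
      rw [← hx, ← hy] at h
      simp only [neg_zero] at h
      exact Or.inr ⟨by omega, by omega, by omega, h⟩
  · rintro (h | ⟨hx, hy1, hy2, hspec⟩)
    · exact Or.inl h
    · refine Or.inr ⟨y, hy1, hy2, by omega, by omega, ?_⟩
      refine (lineSpec_iff_scan board N K r 0 0 1 y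
        (by intro s h1 h2; exact ⟨by omega, by omega, by omega, by omega⟩)
        (by intro l h1 hing; have := hing.2.2.1; omega)
        (by omega)).mpr ?_
      have e1 : r + 0 * y = r := by ring
      have e2 : 0 + 1 * y = y := by ring
      rw [e1, e2, ← hx]
      simp only [neg_zero]
      exact hspec

theorem pass_fwd_rev (board : List (List Int)) (N K r x y : Int) (hr : 0 ≤ r ∧ r < N)
    (S : PySem.Set (Int × Int)) :
    ((x, y) ∈ sweepS board K S none (fwdL N r).reverse ↔
      ((x, y) ∈ S ∨ (x = r ∧ 0 ≤ y ∧ y < N ∧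
        (bAt board x y = 1 ∨ (bAt board x y ≠ 2 ∧ ScanP board N K x y 0 1))))) := by
  rw [fwdL_rev_eq, sweep_line]
  constructor
  · rintro (h | ⟨m, hm1, hm2, hx, hy, hspec⟩)
    · exact Or.inl h
    · have h := (lineSpec_iff_scan board N K r (N - 1) 0 (-1) m
        (by intro s h1 h2; exact ⟨by omega, by omega, by omega, by omega⟩)
        (by intro l h1 hing; have := hing.2.2.2; omega)
        (by omega)).mp hspec
      rw [← hx, ← hy] at h
      simp only [neg_zero, neg_neg] at h
      exact Or.inr ⟨by omega, by omega, by omega, h⟩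
  · rintro (h | ⟨hx, hy1, hy2, hspec⟩)
    · exact Or.inl h
    · refine Or.inr ⟨N - 1 - y, by omega, by omega, by omega, by omega, ?_⟩
      refine (lineSpec_iff_scan board N K r (N - 1) 0 (-1) (N - 1 - y)
        (by intro s h1 h2; exact ⟨by omega, by omega, by omega, by omega⟩)
        (by intro l h1 hing; have := hing.2.2.2; omega)
        (by omega)).mpr ?_
      have e1 : r + 0 * (N - 1 - y) = r := by ring
      have e2 : N - 1 + -1 * (N - 1 - y) = y := by ring
      rw [e1, e2, ← hx]
      simp only [neg_zero, neg_neg]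
      exact hspec

theorem pass_down (board : List (List Int)) (N K r x y : Int) (hr : 0 ≤ r ∧ r < N)
    (S : PySem.Set (Int × Int)) :
    ((x, y) ∈ sweepS board K S none (downL N r) ↔
      ((x, y) ∈ S ∨ (y = r ∧ 0 ≤ x ∧ x < N ∧
        (bAt board x y = 1 ∨ (bAt board x y ≠ 2 ∧ ScanP board N K x y (-1) 0))))) := by
  rw [downL_eq, sweep_line]
  constructor
  · rintro (h | ⟨m, hm1, hm2, hx, hy, hspec⟩)
    · exact Or.inl h
    · have h := (lineSpec_iff_scan board N K 0 r 1 0 m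
        (by intro s h1 h2; exact ⟨by omega, by omega, by omega, by omega⟩)
        (by intro l h1 hing; have := hing.1; omega)
        (by omega)).mp hspec
      rw [← hx, ← hy] at h
      simp only [neg_zero] at h
      exact Or.inr ⟨by omega, by omega, by omega, h⟩
  · rintro (h | ⟨hy, hx1, hx2, hspec⟩)
    · exact Or.inl h
    · refine Or.inr ⟨x, hx1, hx2, by omega, by omega, ?_⟩
      refine (lineSpec_iff_scan board N K 0 r 1 0 x
        (by intro s h1 h2; exact ⟨by omega, by omega, by omega, by omega⟩)
        (by intro l h1 hing; have := hing.1; omega)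
        (by omega)).mpr ?_
      have e1 : 0 + 1 * x = x := by ring
      have e2 : r + 0 * x = r := by ring
      rw [e1, e2, ← hy]
      simp only [neg_zero]
      exact hspec

theorem pass_down_rev (board : List (List Int)) (N K r x y : Int) (hr : 0 ≤ r ∧ r < N)
    (S : PySem.Set (Int × Int)) :
    ((x, y) ∈ sweepS board K S none (downL N r).reverse ↔
      ((x, y) ∈ S ∨ (y = r ∧ 0 ≤ x ∧ x < N ∧
        (bAt board x y = 1 ∨ (bAt board x y ≠ 2 ∧ ScanP board N K x y 1 0))))) := by
  rw [downL_rev_eq, sweep_line]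
  constructor
  · rintro (h | ⟨m, hm1, hm2, hx, hy, hspec⟩)
    · exact Or.inl h
    · have h := (lineSpec_iff_scan board N K (N - 1) r (-1) 0 m
        (by intro s h1 h2; exact ⟨by omega, by omega, by omega, by omega⟩)
        (by intro l h1 hing; have := hing.2.1; omega)
        (by omega)).mp hspec
      rw [← hx, ← hy] at h
      simp only [neg_zero, neg_neg] at h
      exact Or.inr ⟨by omega, by omega, by omega, h⟩
  · rintro (h | ⟨hy, hx1, hx2, hspec⟩)
    · exact Or.inl h
    · refine Or.inr ⟨N - 1 - x, by omega, by omega, by omega, by omega, ?_⟩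
      refine (lineSpec_iff_scan board N K (N - 1) r (-1) 0 (N - 1 - x)
        (by intro s h1 h2; exact ⟨by omega, by omega, by omega, by omega⟩)
        (by intro l h1 hing; have := hing.2.1; omega)
        (by omega)).mpr ?_
      have e1 : N - 1 + -1 * (N - 1 - x) = x := by ring
      have e2 : r + 0 * (N - 1 - x) = r := by ring
      rw [e1, e2, ← hy]
      simp only [neg_zero, neg_neg]
      exact hspec

-- what the block of four passes for line index r marks
def BlockP (board : List (List Int)) (N K r x y : Int) : Prop :=
  (x = r ∧ 0 ≤ y ∧ y < N ∧ (bAt board x y = 1 ∨ (bAt board x y ≠ 2 ∧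
    (ScanP board N K x y 0 (-1) ∨ ScanP board N K x y 0 1)))) ∨
  (y = r ∧ 0 ≤ x ∧ x < N ∧ (bAt board x y = 1 ∨ (bAt board x y ≠ 2 ∧
    (ScanP board N K x y (-1) 0 ∨ ScanP board N K x y 1 0))))

set_option maxHeartbeats 1000000 in
theorem pass_block (board : List (List Int)) (N K r x y : Int) (hr : 0 ≤ r ∧ r < N)
    (S : PySem.Set (Int × Int)) :
    ((x, y) ∈ sweepS board K
        (sweepS board K
          (sweepS board K
            (sweepS board K S none (fwdL N r))
            none (fwdL N r).reverse)
          none (downL N r))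
        none (downL N r).reverse ↔
      ((x, y) ∈ S ∨ BlockP board N K r x y)) := by
  rw [pass_down_rev board N K r x y hr, pass_down board N K r x y hr,
      pass_fwd_rev board N K r x y hr, pass_fwd board N K r x y hr]
  unfold BlockP
  tauto

theorem foldPass (board : List (List Int)) (N K x y : Int) :
    ∀ (rs : List Int) (S : PySem.Set (Int × Int)), (∀ r ∈ rs, 0 ≤ r ∧ r < N) →
      ((x, y) ∈ rs.foldl (fun s r =>
          sweepS board K
            (sweepS board K
              (sweepS board K
                (sweepS board K s none (fwdL N r))
                none (fwdL N r).reverse)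
              none (downL N r))
            none (downL N r).reverse) S ↔
        ((x, y) ∈ S ∨ ∃ r ∈ rs, BlockP board N K r x y)) := by
  intro rs
  induction rs with
  | nil => intro S _; simp
  | cons r rs ih =>
    intro S hb
    simp only [List.foldl_cons]
    rw [ih _ (fun r hr => hb r (List.mem_cons_of_mem _ hr)),
        pass_block board N K r x y (hb r List.mem_cons_self)]
    simp only [List.mem_cons]
    constructor
    · rintro ((h | h) | ⟨r', hr', h⟩)
      · exact Or.inl h
      · exact Or.inr ⟨r, Or.inl rfl, h⟩
      · exact Or.inr ⟨r', Or.inr hr', h⟩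
    · rintro (h | ⟨r', (rfl | hr'), h⟩)
      · exact Or.inl (Or.inl h)
      · exact Or.inl (Or.inr h)
      · exact Or.inr ⟨r', hr', h⟩

theorem dangerB_iff (board : List (List Int)) (K x y : Int) :
    ((x, y) ∈ dangerSet board K ↔
      (InG (board.length : Int) x y ∧ (bAt board x y = 1 ∨
        (bAt board x y ≠ 2 ∧
          (ScanP board (board.length : Int) K x y 0 1 ∨ ScanP board (board.length : Int) K x y 1 0 ∨
           ScanP board (board.length : Int) K x y 0 (-1) ∨ ScanP board (board.length : Int) K x y (-1) 0))))) := by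
  unfold dangerSet
  rw [foldPass board (board.length : Int) K x y (PySem.List.pyRange 0 (board.length : Int) 1)
    _ (by intro r hr; rw [PySem.List.mem_pyRange_one] at hr; exact hr)]
  simp only [PySem.List.mem_pyRange_one]
  constructor
  · rintro (h | ⟨r, hr, hblock⟩)
    · exact absurd h (by simp [PySem.Set.empty])
    · rcases hblock with ⟨hx, hy1, hy2, hin⟩ | ⟨hy, hx1, hx2, hin⟩
      · refine ⟨⟨by omega, by omega, hy1, hy2⟩, ?_⟩
        tauto
      · refine ⟨⟨hx1, hx2, by omega, by omega⟩, ?_⟩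
        tauto
  · rintro ⟨⟨hx1, hx2, hy1, hy2⟩, hin⟩
    refine Or.inr ?_
    rcases hin with hb | ⟨hne, hs | hs | hs | hs⟩
    · exact ⟨x, ⟨hx1, hx2⟩, Or.inl ⟨rfl, hy1, hy2, Or.inl hb⟩⟩
    · exact ⟨x, ⟨hx1, hx2⟩, Or.inl ⟨rfl, hy1, hy2, Or.inr ⟨hne, Or.inr hs⟩⟩⟩
    · exact ⟨y, ⟨hy1, hy2⟩, Or.inr ⟨rfl, hx1, hx2, Or.inr ⟨hne, Or.inr hs⟩⟩⟩
    · exact ⟨x, ⟨hx1, hx2⟩, Or.inl ⟨rfl, hy1, hy2, Or.inr ⟨hne, Or.inl hs⟩⟩⟩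
    · exact ⟨y, ⟨hy1, hy2⟩, Or.inr ⟨rfl, hx1, hx2, Or.inr ⟨hne, Or.inl hs⟩⟩⟩

theorem ray_to_scan (board : List (List Int)) (N K i j u v x y : Int)
    (hij : InG N i j) (hb : bAt board i j = 1)
    (hray : RayP board N K i j u v x y) :
    ScanP board N K x y (-u) (-v) := by
  obtain ⟨l, hl1, hl2, hx, hy, hall⟩ := hray
  subst hx; subst hy
  refine ⟨l, hl1, hl2, ?_, ?_, ?_⟩
  · have e1 : i + u * l + -u * l = i := by ring
    have e2 : j + v * l + -v * l = j := by ring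
    rw [e1, e2]; exact hij
  · have e1 : i + u * l + -u * l = i := by ring
    have e2 : j + v * l + -v * l = j := by ring
    rw [e1, e2]; exact hb
  · intro m hm1 hm2
    have h := hall (l - m) (by omega) (by omega)
    have e1 : i + u * (l - m) = i + u * l + -u * m := by ring
    have e2 : j + v * (l - m) = j + v * l + -v * m := by ring
    rw [e1, e2] at h
    exact h

theorem scan_to_ray (board : List (List Int)) (N K u v x y : Int)
    (hxy : InG N x y) (hne2 : bAt board x y ≠ 2)
    (hscan : ScanP board N K x y u v) :
    ∃ i j, InG N i j ∧ bAt board i j = 1 ∧ RayP board N K i j (-u) (-v) x y := by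
  obtain ⟨l, hl1, hl2, hing, hb1, hall⟩ := hscan
  refine ⟨x + u * l, y + v * l, hing, hb1, l, hl1, hl2, by ring, by ring, ?_⟩
  intro m hm1 hm2
  by_cases hml : m = l
  · subst hml
    have e1 : x + u * m + -u * m = x := by ring
    have e2 : y + v * m + -v * m = y := by ring
    rw [e1, e2]
    exact ⟨hxy, hne2⟩
  · have h := hall (l - m) (by omega) (by omega)
    have e1 : x + u * (l - m) = x + u * l + -u * m := by ring
    have e2 : y + v * (l - m) = y + v * l + -v * m := by ring
    rw [e1, e2] at h
    exact h

-- the two danger representations agree pointwise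
theorem danger_rel (board : List (List Int)) (K : Int) (p : Int × Int) :
    bombGridA board K p.1 p.2 = PySem.Set.contains (dangerSet board K) p := by
  obtain ⟨x, y⟩ := p
  rw [Bool.eq_iff_iff, PySem.Set.contains_iff, bombA_iff, dangerB_iff]
  constructor
  · rintro ⟨i, hi, j, hj, hb1, hmark⟩
    have hij : InG (board.length : Int) i j := ⟨hi.1, hi.2, hj.1, hj.2⟩
    rcases hmark with ⟨rfl, rfl⟩ | hr | hr | hr | hr
    · exact ⟨hij, Or.inl hb1⟩
    all_goals {
      obtain ⟨l, hl1, hl2, hx, hy, hall⟩ := hr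
      have hlast := hall l hl1 le_rfl
      rw [← hx, ← hy] at hlast
      obtain ⟨hxy, hne2⟩ := hlast
      by_cases hb : bAt board x y = 1
      · exact ⟨hxy, Or.inl hb⟩
      · refine ⟨hxy, Or.inr ⟨hne2, ?_⟩⟩
        have hs := ray_to_scan board (board.length : Int) K i j _ _ x y hij hb1
          ⟨l, hl1, hl2, hx, hy, hall⟩
        simp only [neg_zero, neg_neg] at hs
        tauto
    }
  · rintro ⟨hxy, (hb | ⟨hb2, hscans⟩)⟩
    · exact ⟨x, ⟨hxy.1, hxy.2.1⟩, y, ⟨hxy.2.2.1, hxy.2.2.2⟩, hb, Or.inl ⟨rfl, rfl⟩⟩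
    · rcases hscans with hs | hs | hs | hs
      all_goals {
        obtain ⟨i, j, hij, hb, hray⟩ := scan_to_ray board (board.length : Int) K _ _ x y hxy hb2 hs
        simp only [neg_zero, neg_neg] at hray
        exact ⟨i, ⟨hij.1, hij.2.1⟩, j, ⟨hij.2.2.1, hij.2.2.2⟩, hb, by unfold MarkP; tauto⟩
      }

-- ===== BFS bridge =====

def cfun (i j k : Int) : Int × Int :=
  (i + PySem.List.pyGetD diA k 0, j + PySem.List.pyGetD djA k 0)

def ingridB (N : Int) (p : Int × Int) : Bool :=
  decide (0 ≤ p.1) && decide (p.1 < N) && decide (0 ≤ p.2) && decide (p.2 < N)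

def escB (board : List (List Int)) (danger : PySem.Set (Int × Int)) (p : Int × Int) : Bool :=
  !(PySem.Set.contains danger p) && !(cellB board p == 2)

def freshB (board : List (List Int)) (danger visited : PySem.Set (Int × Int)) (p : Int × Int) : Bool :=
  PySem.Set.contains danger p && (cellB board p == 0) && !(PySem.Set.contains visited p)

theorem scan_bridge (board : List (List Int)) (N : Int) (bomb : Int → Int → Bool)
    (danger : PySem.Set (Int × Int))
    (hd : ∀ p : Int × Int, bomb p.1 p.2 = PySem.Set.contains danger p)
    (i j t : Int) :
    ∀ (ks : List Int) (visit : Int → Int → Bool) (visited : PySem.Set (Int × Int)),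
      (∀ p : Int × Int, visit p.1 p.2 = PySem.Set.contains visited p) →
      (ks.map (cfun i j)).Nodup →
      (if ((ks.map (cfun i j)).filter (ingridB N)).any (escB board danger) then
        (scanA board N bomb i j t visit ks).1 = some (t + 1)
      else
        (scanA board N bomb i j t visit ks).1 = none ∧
        (∀ p : Int × Int, (scanA board N bomb i j t visit ks).2.1 p.1 p.2
            = PySem.Set.contains
                (PySem.Set.update visited
                  (((ks.map (cfun i j)).filter (ingridB N)).filter (freshB board danger visited))) p) ∧
        (scanA board N bomb i j t visit ks).2.2
            = (((ks.map (cfun i j)).filter (ingridB N)).filter (freshB board danger visited)).map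
                (fun p => (p.1, p.2, t + 1))) := by
  intro ks
  induction ks with
  | nil =>
    intro visit visited hv _
    simp only [List.map_nil, List.filter_nil, List.any_nil, Bool.false_eq_true, if_false, scanA]
    exact ⟨trivial, fun p => hv p, trivial⟩
  | cons k ks ih =>
    intro visit visited hv hnd
    simp only [List.map_cons, List.filter_cons]
    simp only [List.map_cons, List.nodup_cons] at hnd
    obtain ⟨hc_not, hnd'⟩ := hnd
    have hc1 : (cfun i j k).1 = i + PySem.List.pyGetD diA k 0 := rfl
    have hc2 : (cfun i j k).2 = j + PySem.List.pyGetD djA k 0 := rfl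
    have hcell : cellB board (cfun i j k)
        = bAt board (i + PySem.List.pyGetD diA k 0) (j + PySem.List.pyGetD djA k 0) := rfl
    have hb := hd (cfun i j k)
    rw [hc1, hc2] at hb
    have hvp := hv (cfun i j k)
    rw [hc1, hc2] at hvp
    by_cases hin : 0 ≤ i + PySem.List.pyGetD diA k 0 ∧ i + PySem.List.pyGetD diA k 0 < N ∧
        0 ≤ j + PySem.List.pyGetD djA k 0 ∧ j + PySem.List.pyGetD djA k 0 < N
    · have hinB : ingridB N (cfun i j k) = true := by
        simp only [ingridB, hc1, hc2, Bool.and_eq_true, decide_eq_true_eq]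
        exact ⟨⟨⟨hin.1, hin.2.1⟩, hin.2.2.1⟩, hin.2.2.2⟩
      rw [if_pos hinB]
      simp only [List.filter_cons]
      by_cases hesc : ¬ bomb (i + PySem.List.pyGetD diA k 0) (j + PySem.List.pyGetD djA k 0) = true ∧
          bAt board (i + PySem.List.pyGetD diA k 0) (j + PySem.List.pyGetD djA k 0) ≠ 2
      · have hescB : escB board danger (cfun i j k) = true := by
          simp only [escB, Bool.and_eq_true, Bool.not_eq_true', beq_eq_false_iff_ne, ne_eq, hcell]
          rw [← hb]
          exact ⟨by simpa using hesc.1, hesc.2⟩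
        simp only [List.any_cons, hescB, Bool.true_or, if_true]
        simp only [scanA, if_pos hin, if_pos hesc]
      · have hescB : escB board danger (cfun i j k) = false := by
          simp only [escB, hcell]
          rw [← hb]
          by_cases h1 : bomb (i + PySem.List.pyGetD diA k 0) (j + PySem.List.pyGetD djA k 0) = true
          · simp [h1]
          · simp only [h1] at hesc
            push_neg at hesc
            have h2 := hesc (by simpa using h1)
            simp only [Bool.not_eq_true] at h1
            simp [h1, h2]
        simp only [List.any_cons, hescB, Bool.false_or]
        by_cases hfr : bomb (i + PySem.List.pyGetD diA k 0) (j + PySem.List.pyGetD djA k 0) = true ∧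
            bAt board (i + PySem.List.pyGetD diA k 0) (j + PySem.List.pyGetD djA k 0) = 0 ∧
            ¬ visit (i + PySem.List.pyGetD diA k 0) (j + PySem.List.pyGetD djA k 0) = true
        · have hfrB : freshB board danger visited (cfun i j k) = true := by
            simp only [freshB, Bool.and_eq_true, Bool.not_eq_true', hcell, beq_iff_eq]
            rw [← hb, ← hvp]
            exact ⟨⟨hfr.1, hfr.2.1⟩, by simpa using hfr.2.2⟩
          rw [if_pos hfrB]
          -- A recurses with visit' = gset visit c; relate it to visited' = add visited c
          have hv' : ∀ p : Int × Int, (gset visit (i + PySem.List.pyGetD diA k 0)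
              (j + PySem.List.pyGetD djA k 0)) p.1 p.2
              = PySem.Set.contains (PySem.Set.add visited (cfun i j k)) p := by
            intro p
            rw [Bool.eq_iff_iff, gset_iff, PySem.Set.contains_iff, PySem.Set.mem_add]
            have hvq := hv p
            rw [Bool.eq_iff_iff, PySem.Set.contains_iff] at hvq
            constructor
            · rintro (h | ⟨h1, h2⟩)
              · exact Or.inl (hvq.mp h)
              · exact Or.inr (by rw [Prod.ext_iff]; exact ⟨h1, h2⟩)
            · rintro (h | h)
              · exact Or.inl (hvq.mpr h)
              · exact Or.inr (Prod.ext_iff.mp h)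
          have ihv := ih (gset visit (i + PySem.List.pyGetD diA k 0)
              (j + PySem.List.pyGetD djA k 0)) (PySem.Set.add visited (cfun i j k)) hv' hnd'
          -- the tail filter does not see the freshly added cell
          have hfilt : ((ks.map (cfun i j)).filter (ingridB N)).filter
                (freshB board danger (PySem.Set.add visited (cfun i j k)))
              = ((ks.map (cfun i j)).filter (ingridB N)).filter
                (freshB board danger visited) := by
            refine List.filter_congr ?_
            intro p hp
            have hpmem : p ∈ ks.map (cfun i j) := List.mem_of_mem_filter hp
            have hpne : p ≠ cfun i j k := fun h => hc_not (h ▸ hpmem)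
            simp only [freshB]
            have hcc : PySem.Set.contains (PySem.Set.add visited (cfun i j k)) p
                = PySem.Set.contains visited p := by
              rw [Bool.eq_iff_iff, PySem.Set.contains_iff, PySem.Set.contains_iff,
                  PySem.Set.mem_add]
              constructor
              · rintro (h | h)
                · exact h
                · exact absurd h hpne
              · exact Or.inl
            rw [hcc]
          rw [hfilt] at ihv
          -- unfold one step of scanA on the A side
          simp only [scanA, if_pos hin, if_neg hesc, if_pos hfr]
          by_cases hany : ((ks.map (cfun i j)).filter (ingridB N)).any (escB board danger) = true
          · rw [if_pos hany]
            rw [if_pos hany] at ihv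
            exact ihv
          · rw [if_neg hany] at ihv ⊢
            obtain ⟨ih1, ih2, ih3⟩ := ihv
            refine ⟨ih1, ?_, ?_⟩
            · intro p
              have e : PySem.Set.update visited
                    (cfun i j k :: ((ks.map (cfun i j)).filter (ingridB N)).filter
                      (freshB board danger visited))
                  = PySem.Set.update (PySem.Set.add visited (cfun i j k))
                    (((ks.map (cfun i j)).filter (ingridB N)).filter
                      (freshB board danger visited)) := rfl
              rw [e]
              exact ih2 p
            · simp only [List.map_cons]
              rw [ih3, hc1, hc2]
        · have hfrB : freshB board danger visited (cfun i j k) = false := by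
            simp only [freshB, hcell]
            rw [← hb, ← hvp]
            push_neg at hfr
            by_cases h1 : bomb (i + PySem.List.pyGetD diA k 0) (j + PySem.List.pyGetD djA k 0) = true
            · by_cases h2 : bAt board (i + PySem.List.pyGetD diA k 0) (j + PySem.List.pyGetD djA k 0) = 0
              · have h3 := hfr h1 h2
                simp [h1, h2, h3]
              · simp [h1, h2]
            · simp only [Bool.not_eq_true] at h1
              simp [h1]
          rw [if_neg (by simp [hfrB] : ¬ freshB board danger visited (cfun i j k) = true)]
          simp only [scanA, if_pos hin, if_neg hesc, if_neg hfr]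
          exact ih visit visited hv hnd'
    · have hinB : ingridB N (cfun i j k) = false := by
        simp only [ingridB, hc1, hc2]
        rcases not_and_or.mp hin with h | h
        · simp [h]
        rcases not_and_or.mp h with h | h
        · simp [h]
        rcases not_and_or.mp h with h | h
        · simp [h]
        · simp [h]
      rw [if_neg (by simp [hinB] : ¬ ingridB N (cfun i j k) = true)]
      simp only [scanA, if_neg hin]
      exact ih visit visited hv hnd'

theorem bfs_bridge (board : List (List Int)) (N : Int) (bomb : Int → Int → Bool)
    (danger : PySem.Set (Int × Int))
    (hd : ∀ p : Int × Int, bomb p.1 p.2 = PySem.Set.contains danger p) :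
    ∀ (f : Nat) (q : List (Int × Int × Int)) (visit : Int → Int → Bool)
      (visited : PySem.Set (Int × Int)),
      (∀ p : Int × Int, visit p.1 p.2 = PySem.Set.contains visited p) →
      bfsA board N bomb f q visit = bfsLoopB board N danger f q visited := by
  intro f
  induction f with
  | zero => intro q visit visited hv; rfl
  | succ f ih =>
    intro q visit visited hv
    cases q with
    | nil => rfl
    | cons hd0 rest =>
      obtain ⟨i, j, t⟩ := hd0
      have hmap : (PySem.List.pyRange 0 4 1).map (cfun i j)
          = [(i, j + 1), (i + 1, j), (i, j - 1), (i - 1, j)] := by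
        rw [show PySem.List.pyRange 0 4 1 = [0, 1, 2, 3] from by decide]
        simp only [List.map_cons, List.map_nil, cfun]
        rw [show PySem.List.pyGetD diA 0 0 = (0 : Int) from by decide,
            show PySem.List.pyGetD djA 0 0 = (1 : Int) from by decide,
            show PySem.List.pyGetD diA 1 0 = (1 : Int) from by decide,
            show PySem.List.pyGetD djA 1 0 = (0 : Int) from by decide,
            show PySem.List.pyGetD diA 2 0 = (0 : Int) from by decide,
            show PySem.List.pyGetD djA 2 0 = (-1 : Int) from by decide,
            show PySem.List.pyGetD diA 3 0 = (-1 : Int) from by decide,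
            show PySem.List.pyGetD djA 3 0 = (0 : Int) from by decide]
        norm_num
        constructor <;> ring
      have hnd : ((PySem.List.pyRange 0 4 1).map (cfun i j)).Nodup := by
        rw [hmap]
        simp only [List.nodup_cons, List.mem_cons, List.not_mem_nil,
          List.nodup_nil, Prod.ext_iff, not_or, and_true, not_and, not_false_iff]
        omega
      have hsc := scan_bridge board N bomb danger hd i j t (PySem.List.pyRange 0 4 1)
        visit visited hv hnd
      rw [hmap] at hsc
      have hns : List.filter (ingridB N) [(i, j + 1), (i + 1, j), (i, j - 1), (i - 1, j)]
          = nbrsB N i j := rfl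
      rw [hns] at hsc
      -- unfold one step of each loop and name B's inline predicates
      show (match scanA board N bomb i j t visit (PySem.List.pyRange 0 4 1) with
        | (some r, _, _) => r
        | (none, visit', pushes) => bfsA board N bomb f (rest ++ pushes) visit') = _
      simp only [bfsLoopB]
      rw [show (fun p => !(PySem.Set.contains danger p) && !(cellB board p == 2))
            = escB board danger from rfl,
          show (fun p => PySem.Set.contains danger p && (cellB board p == 0)
              && !(PySem.Set.contains visited p)) = freshB board danger visited from rfl]
      rcases hres : scanA board N bomb i j t visit (PySem.List.pyRange 0 4 1) with ⟨o, v2, ps⟩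
      rw [hres] at hsc
      by_cases hany : (nbrsB N i j).any (escB board danger) = true
      · rw [if_pos hany] at hsc ⊢
        simp only at hsc
        rw [hsc]
      · rw [if_neg hany] at hsc ⊢
        obtain ⟨h1, h2, h3⟩ := hsc
        simp only at h1 h2 h3
        rw [h1, h3]
        exact ih (rest ++ ((nbrsB N i j).filter (freshB board danger visited)).map
          (fun p => (p.1, p.2, t + 1))) v2 _ h2

-- ===== VERDICT (by name: the statement is the Claim_ definition above) =====
theorem solution_spec : Claim_equal_solution := by
  intro board K Ax Ay _ _
  unfold Spec_solution solution solution_alt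
  exact bfs_bridge board (board.length : Int) (bombGridA board K) (dangerSet board K)
    (danger_rel board K) _ _ _ _ (by intro p; rfl)
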